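-- pv_equiv track=rewrite | github.com/seawee1/Did-Somebody-Say-Corgi | dataset/dataset_tool.py | get_base_ext
-- ===== SOURCE A (Python) =====
-- def get_base_ext(file_name):
--     # In case filename has dots in it
--     basename = ''
--     split = file_name.split('.')
--     for i in range(len(split) - 1):
--         basename += split[i] + '.'
--     basename = basename[:-1]
--     ext = split[-1]
--     return basename, ext
-- ===== SOURCE B (Python) =====
-- def get_base_ext(file_name):
--     idx = file_name.rfind('.')
--     if idx == -1:
--         return '', file_name
--     return file_name[:idx], file_name[idx + 1:]
-- ===== Notes on version B (the rewrite author's own statement) =====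
-- stated objective: simpler
-- what changed: Replace split('.') plus an accumulation loop that rejoins all but the last piece with a single rfind('.') and two slices around the last dot.
import Mathlib
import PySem

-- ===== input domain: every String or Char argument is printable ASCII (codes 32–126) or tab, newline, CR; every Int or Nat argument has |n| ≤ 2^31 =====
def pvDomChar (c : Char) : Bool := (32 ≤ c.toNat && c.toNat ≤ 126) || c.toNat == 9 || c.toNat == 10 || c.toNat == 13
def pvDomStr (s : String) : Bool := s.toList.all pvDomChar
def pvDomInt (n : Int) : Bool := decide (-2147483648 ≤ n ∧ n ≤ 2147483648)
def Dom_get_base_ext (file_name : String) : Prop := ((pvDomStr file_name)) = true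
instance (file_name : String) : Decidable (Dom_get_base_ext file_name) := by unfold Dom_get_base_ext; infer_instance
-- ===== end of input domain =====

-- B replaces A's split('.')-and-rejoin loop by one rfind('.') and two slices (simpler; return value only, no mutation).

-- ===== PORT A =====
def get_base_ext (file_name : String) : String × String :=
  let split := PySem.Chars.splitOn file_name.toList ['.']            -- file_name.split('.')
  let basename :=                                                    -- for i in range(len(split)-1): basename += split[i] + '.'
    (PySem.List.pyRange 0 ((split.length : Int) - 1) 1).foldl
      (fun b i => b ++ PySem.List.pyGetD split i [] ++ ['.']) ([] : List Char)
  let basename := PySem.List.slice basename none (some (-1))         -- basename[:-1]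
  let ext := PySem.List.pyGetD split (-1) []                         -- split[-1]
  (String.ofList basename, String.ofList ext)

-- ===== PORT B =====
def get_base_ext_alt (file_name : String) : String × String :=
  let idx := PySem.Str.rfind file_name "."                           -- file_name.rfind('.')
  if idx = -1 then ("", file_name)
  else (String.ofList (PySem.List.slice file_name.toList none (some idx)),         -- file_name[:idx]
        String.ofList (PySem.List.slice file_name.toList (some (idx + 1)) none))   -- file_name[idx+1:]

-- ===== PRECONDITION & SPEC =====
def Spec_get_base_ext (file_name : String) (out : String × String) : Prop := out = get_base_ext_alt file_name
instance (file_name : String) (out : String × String) : Decidable (Spec_get_base_ext file_name out) := by unfold Spec_get_base_ext; infer_instance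

-- ===== CLAIM (what is proved, stated in full; the proofs are below) =====
def Claim_equal_get_base_ext : Prop := ∀ (file_name : String), Dom_get_base_ext file_name → Spec_get_base_ext file_name (get_base_ext file_name)

-- ===== LEMMAS AND PROOFS =====

-- reference recursion for split('.'): pvSp acc cs = the pieces of acc ++ cs with acc already read
def pvSp : List Char → List Char → List (List Char)
  | acc, [] => [acc]
  | acc, c :: rest => if c = '.' then acc :: pvSp [] rest else pvSp (acc ++ [c]) rest

theorem pvSp_go (l : List Char) : ∀ (fuel : Nat) (cur : List Char) (acc : List (List Char)),
    l.length < fuel →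
    PySem.Chars.splitOn.go ['.'] fuel l cur acc = acc.reverse ++ pvSp cur.reverse l := by
  induction l with
  | nil =>
    intro fuel cur acc h
    match fuel, h with
    | fuel + 1, _ => rw [PySem.Chars.splitOn.go.eq_def]; simp [pvSp]
  | cons c rest ih =>
    intro fuel cur acc h
    simp only [List.length_cons] at h
    match fuel, h with
    | fuel + 1, h =>
      rw [PySem.Chars.splitOn.go.eq_def]
      simp only [List.isPrefixOf, Bool.and_true]
      by_cases hc : c = '.'
      · subst hc
        rw [if_pos (by simp)]
        simp only [List.length_singleton, List.drop_succ_cons, List.drop_zero]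
        rw [ih fuel [] (cur.reverse :: acc) (by omega)]
        simp [pvSp]
      · rw [if_neg (by simpa using fun hcc => hc hcc.symm)]
        rw [ih fuel (c :: cur) acc (by omega)]
        simp [pvSp, hc]

theorem splitOn_eq_pvSp (cs : List Char) : PySem.Chars.splitOn cs ['.'] = pvSp [] cs := by
  rw [PySem.Chars.splitOn]
  rw [pvSp_go cs (cs.length + 1) [] [] (by omega)]
  simp

-- split a list at its LAST '.' : none iff no '.'
def pvSplitLast : List Char → Option (List Char × List Char)
  | [] => none
  | c :: rest =>
    match pvSplitLast rest with
    | some (b, e) => some (c :: b, e)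
    | none => if c = '.' then some ([], rest) else none

theorem pvSplitLast_none {cs : List Char} (h : pvSplitLast cs = none) : '.' ∉ cs := by
  induction cs with
  | nil => simp
  | cons c rest ih =>
    rw [pvSplitLast] at h
    cases hr : pvSplitLast rest with
    | some p => rw [hr] at h; cases p; simp at h
    | none =>
      rw [hr] at h
      split_ifs at h with hc
      simp only [List.mem_cons, not_or]
      exact ⟨fun hcc => hc hcc.symm, ih hr⟩

theorem pvSplitLast_some {cs b e : List Char} (h : pvSplitLast cs = some (b, e)) :
    cs = b ++ '.' :: e ∧ '.' ∉ e := by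
  induction cs generalizing b e with
  | nil => simp [pvSplitLast] at h
  | cons c rest ih =>
    rw [pvSplitLast] at h
    cases hr : pvSplitLast rest with
    | some p =>
      obtain ⟨b', e'⟩ := p
      rw [hr] at h
      simp only [Option.some.injEq, Prod.mk.injEq] at h
      obtain ⟨hb, he⟩ := h
      obtain ⟨h1, h2⟩ := ih hr
      subst hb; subst he
      simp [h1, h2]
    | none =>
      rw [hr] at h
      split_ifs at h with hc
      simp only [Option.some.injEq, Prod.mk.injEq] at h
      obtain ⟨hb, he⟩ := h
      subst hc; subst he
      simp [← hb, pvSplitLast_none hr]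

theorem pvSp_of_none {cs : List Char} (h : pvSplitLast cs = none) (acc : List Char) :
    pvSp acc cs = [acc ++ cs] := by
  induction cs generalizing acc with
  | nil => simp [pvSp]
  | cons c rest ih =>
    rw [pvSplitLast] at h
    cases hr : pvSplitLast rest with
    | some p => rw [hr] at h; cases p; simp at h
    | none =>
      rw [hr] at h
      split_ifs at h with hc
      rw [pvSp, if_neg hc, ih hr]
      simp

theorem pvSp_of_some {cs b e : List Char} (h : pvSplitLast cs = some (b, e)) (acc : List Char) :
    ∃ ps, pvSp acc cs = ps ++ [e] ∧ (ps.map (· ++ ['.'])).flatten = acc ++ b ++ ['.'] := by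
  induction cs generalizing b e acc with
  | nil => simp [pvSplitLast] at h
  | cons c rest ih =>
    rw [pvSplitLast] at h
    cases hr : pvSplitLast rest with
    | some p =>
      obtain ⟨b', e'⟩ := p
      rw [hr] at h
      simp only [Option.some.injEq, Prod.mk.injEq] at h
      obtain ⟨hb, he⟩ := h
      subst he
      by_cases hc : c = '.'
      · subst hc
        obtain ⟨ps', hps', hfl⟩ := ih hr []
        refine ⟨acc :: ps', ?_, ?_⟩
        · rw [pvSp, if_pos rfl, hps']; simp
        · simp [hfl, ← hb]
      · obtain ⟨ps', hps', hfl⟩ := ih hr (acc ++ [c])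
        refine ⟨ps', ?_, ?_⟩
        · rw [pvSp, if_neg hc, hps']
        · simp [hfl, ← hb]
    | none =>
      rw [hr] at h
      split_ifs at h with hc
      simp only [Option.some.injEq, Prod.mk.injEq] at h
      obtain ⟨hb, he⟩ := h
      subst hc; subst he
      refine ⟨[acc], ?_, ?_⟩
      · rw [pvSp, if_pos rfl, pvSp_of_none hr]; simp
      · simp [← hb]

theorem rfind_go_of_not_mem {cs : List Char} (h : '.' ∉ cs) :
    ∀ j, PySem.Chars.rfind.go cs ['.'] j = -1 := by
  intro j
  induction j with
  | zero =>
    rw [PySem.Chars.rfind.go]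
    rw [if_neg]
    intro hp
    cases cs with
    | nil => simp [List.isPrefixOf] at hp
    | cons c rest =>
      simp only [List.isPrefixOf, Bool.and_true, beq_iff_eq] at hp
      exact h (List.mem_cons.mpr (Or.inl hp))
  | succ j ih =>
    rw [PySem.Chars.rfind.go]
    rw [if_neg, ih]
    intro hp
    cases hd : List.drop (j + 1) cs with
    | nil => rw [hd] at hp; simp [List.isPrefixOf] at hp
    | cons c rest =>
      rw [hd] at hp
      simp only [List.isPrefixOf, Bool.and_true, beq_iff_eq] at hp
      have : c ∈ cs := by
        have : c ∈ List.drop (j + 1) cs := by simp [hd]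
        exact List.mem_of_mem_drop this
      exact h (hp ▸ this)

theorem rfind_go_eq {b e : List Char} (he : '.' ∉ e) :
    ∀ j, b.length ≤ j → PySem.Chars.rfind.go (b ++ '.' :: e) ['.'] j = (b.length : Int) := by
  intro j
  induction j with
  | zero =>
    intro hj
    have hb : b = [] := List.eq_nil_of_length_eq_zero (by omega)
    subst hb
    rw [PySem.Chars.rfind.go]
    simp [List.isPrefixOf]
  | succ j ih =>
    intro hj
    rw [PySem.Chars.rfind.go]
    by_cases hbe : b.length = j + 1
    · rw [if_pos]
      · exact_mod_cast hbe.symm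
      · have : List.drop (j + 1) (b ++ '.' :: e) = '.' :: e := by
          rw [← hbe]; simp
        rw [this]
        simp [List.isPrefixOf]
    · have hle : b.length ≤ j := by omega
      rw [if_neg, ih hle]
      intro hp
      have hdrop : List.drop (j + 1) (b ++ '.' :: e) = List.drop (j - b.length) e := by
        have h2 : j + 1 = b.length + (j - b.length + 1) := by omega
        rw [h2, List.drop_append]
        rw [List.drop_eq_nil_of_le (by omega), List.nil_append, Nat.add_sub_cancel_left,
          List.drop_succ_cons]
      rw [hdrop] at hp
      cases hd : List.drop (j - b.length) e with
      | nil => rw [hd] at hp; exact absurd hp (by simp)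
      | cons c rest =>
        rw [hd] at hp
        simp only [List.isPrefixOf, Bool.and_true, beq_iff_eq] at hp
        have : c ∈ e := List.mem_of_mem_drop (by rw [hd]; simp)
        exact he (hp ▸ this)

-- A's accumulation loop over range(len(split)-1), characterised
theorem pvFold (xs : List (List Char)) :
    ∀ (n : Nat) (init : List Char), n ≤ xs.length →
    (PySem.List.pyRange 0 (n : Int) 1).foldl
      (fun b i => b ++ PySem.List.pyGetD xs i [] ++ ['.']) init
    = init ++ ((xs.take n).map (· ++ ['.'])).flatten := by
  intro n
  induction n with
  | zero => intro init _; simp [PySem.List.pyRange]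
  | succ n ih =>
    intro init hn
    have : ((n : Int) + 1) = ((n + 1 : Nat) : Int) := by push_cast; ring
    rw [← this, PySem.List.pyRange_one_succ_right (by positivity), List.foldl_append]
    rw [ih init (by omega)]
    simp only [List.foldl_cons, List.foldl_nil]
    rw [PySem.List.pyGetD_natCast]
    have hlt : n < xs.length := by omega
    rw [List.getD_eq_getElem _ _ hlt, List.take_add_one, List.getElem?_eq_getElem hlt]
    simp only [List.map_append, List.flatten_append, List.map_cons, List.map_nil,
      List.flatten_cons, List.flatten_nil, Option.toList_some, List.append_nil, List.append_assoc]

theorem get_base_ext_eq (file_name : String) :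
    get_base_ext file_name = get_base_ext_alt file_name := by
  unfold get_base_ext get_base_ext_alt
  have hr : PySem.Str.rfind file_name "." = PySem.Chars.rfind file_name.toList ['.'] := by
    simp [PySem.Str.rfind_eq]
  cases h : pvSplitLast file_name.toList with
  | none =>
    -- no dot: A's split is the whole string, B's rfind is -1
    have hnm : '.' ∉ file_name.toList := pvSplitLast_none h
    have hs : PySem.Chars.splitOn file_name.toList ['.'] = [file_name.toList] := by
      rw [splitOn_eq_pvSp, pvSp_of_none h]; simp
    have hrf : PySem.Chars.rfind file_name.toList ['.'] = -1 := by
      rw [PySem.Chars.rfind]; exact rfind_go_of_not_mem hnm _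
    simp only [hs, hr, hrf]
    simp only [List.length_singleton]
    norm_num
    constructor
    · rw [PySem.List.slice_to_neg_one, List.dropLast_nil]
    · rw [show ((-1 : Int)) = -((1 : Nat) : Int) from rfl,
        PySem.List.pyGetD_neg_natCast _ 1 _ (by omega) (by simp)]
      simp [String.ofList_toList]
  | some p =>
    obtain ⟨b, e⟩ := p
    obtain ⟨hcs, he⟩ := pvSplitLast_some h
    obtain ⟨ps, hps, hfl⟩ := pvSp_of_some h []
    have hs : PySem.Chars.splitOn file_name.toList ['.'] = ps ++ [e] := by
      rw [splitOn_eq_pvSp, hps]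
    have hrf : PySem.Chars.rfind file_name.toList ['.'] = (b.length : Int) := by
      rw [PySem.Chars.rfind, hcs]
      exact rfind_go_eq he _ (by simp)
    have hne : ((b.length : Int)) ≠ -1 := by omega
    simp only [hs, hr, hrf, if_neg hne]
    have hlen : ((ps ++ [e]).length : Int) - 1 = ((ps.length : Nat) : Int) := by
      simp
    rw [hlen, pvFold (ps ++ [e]) ps.length [] (by simp)]
    rw [List.take_left]
    simp only [List.nil_append] at hfl ⊢
    rw [hfl]
    simp only [Prod.mk.injEq]
    constructor
    · -- basename: dropLast (b ++ ['.']) = b = take b.length cs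
      rw [PySem.List.slice_to_neg_one, List.dropLast_concat]
      rw [PySem.List.slice_to_natCast, hcs, List.take_left]
    · -- ext: split[-1] = e = drop (b.length+1) cs
      rw [show ((-1 : Int)) = -((1 : Nat) : Int) by rfl]
      rw [PySem.List.pyGetD_neg_natCast _ 1 _ (by omega) (by simp)]
      have h1 : ((b.length : Int) + 1) = ((b.length + 1 : Nat) : Int) := by push_cast; ring
      rw [h1, PySem.List.slice_from_natCast, hcs]
      have : List.drop (b.length + 1) (b ++ '.' :: e) = e := by
        simp [List.drop_append]
      rw [this]
      simp

-- ===== VERDICT (by name: the statement is the Claim_ definition above) =====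
theorem get_base_ext_spec : Claim_equal_get_base_ext := by
  intro file_name _
  unfold Spec_get_base_ext
  exact get_base_ext_eq file_name
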